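-- pv_equiv track=rewrite | github.com/dradetsky/companyname-timed-assignment | delivery-stats.py | count_open_deliveries
-- ===== SOURCE A (Python) =====
-- def count_open_deliveries(data):
--     n_starts = 0
--     n_ends = 0
--     for rec in data:
--         if rec['type'] == 'delivery-started':
--             n_starts += 1
--         elif rec['type'] == 'delivery-ended':
--             n_ends += 1
--         else:
--             raise ValueError
--
--     n_open = n_starts - n_ends
--     return n_open
-- ===== SOURCE B (Python) =====
-- def count_open_deliveries(data):
--     types = [rec['type'] for rec in data]
--     if set(types) - {'delivery-started', 'delivery-ended'}:
--         raise ValueError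
--     return types.count('delivery-started') - types.count('delivery-ended')
-- ===== Notes on version B (the rewrite author's own statement) =====
-- stated objective: idiomatic
-- what changed: B extracts the type list once, validates it with a single set-difference test instead of A's per-record else branch, and gets the result from two list.count calls instead of A's hand-maintained pair of accumulators.
import Mathlib
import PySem

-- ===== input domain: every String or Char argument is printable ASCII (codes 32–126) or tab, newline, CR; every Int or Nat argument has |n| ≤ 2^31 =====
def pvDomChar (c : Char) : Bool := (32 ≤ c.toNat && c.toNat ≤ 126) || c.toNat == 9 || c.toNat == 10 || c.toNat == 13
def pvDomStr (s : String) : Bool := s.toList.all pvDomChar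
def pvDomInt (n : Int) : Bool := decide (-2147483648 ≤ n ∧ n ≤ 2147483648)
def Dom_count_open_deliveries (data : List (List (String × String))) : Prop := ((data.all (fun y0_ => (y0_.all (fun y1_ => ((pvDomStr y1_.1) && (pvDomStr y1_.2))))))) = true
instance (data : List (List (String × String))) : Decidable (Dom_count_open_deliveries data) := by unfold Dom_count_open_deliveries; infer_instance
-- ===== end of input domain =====

-- B re-reads A's per-record if/elif counting loop as: collect the types, validate them with one
-- set-difference test, and return list.count minus list.count (idiomatic restructuring, same cost).
-- Pre_ excludes inputs where A raises (a record lacking 'type' → KeyError, or an unknown type → ValueError).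

-- ===== PORT A =====
-- rec['type'] : under Pre_ the key exists; the getD "" default is never reached there (KeyError region is outside Pre_)
def pvTypeOf (rec : List (String × String)) : String :=
  ((PySem.Dict.ofList rec).get? "type").getD ""

def count_open_deliveries (data : List (List (String × String))) : Int :=
  let st := data.foldl (fun (st : Int × Int) rec =>
    if pvTypeOf rec = "delivery-started" then (st.1 + 1, st.2)
    else if pvTypeOf rec = "delivery-ended" then (st.1, st.2 + 1)
    else st)  -- Python raises ValueError here; outside Pre_, state left unchanged
    (0, 0)
  st.1 - st.2

-- ===== PORT B =====
def count_open_deliveries_alt (data : List (List (String × String))) : Int :=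
  let types := data.map pvTypeOf
  if (PySem.Set.diff (PySem.Set.ofList types) ["delivery-started", "delivery-ended"]) ≠ [] then
    0  -- Python raises ValueError here; outside Pre_
  else
    (types.count "delivery-started" : Int) - (types.count "delivery-ended" : Int)

-- ===== PRECONDITION & SPEC =====
-- Pre_: exactly the inputs on which A returns (every record has a 'type' key whose value is one of the two event names)
def Pre_count_open_deliveries (data : List (List (String × String))) : Prop :=
  ∀ rec ∈ data, (PySem.Dict.ofList rec).get? "type" = some "delivery-started" ∨
                (PySem.Dict.ofList rec).get? "type" = some "delivery-ended"
instance (data : List (List (String × String))) : Decidable (Pre_count_open_deliveries data) := by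
  unfold Pre_count_open_deliveries; infer_instance

def pvWitness_count_open_deliveries : (List (List (String × String))) :=
  [[("type", "delivery-started")], [("type", "delivery-ended")], [("type", "delivery-started")]]

def Spec_count_open_deliveries (data : List (List (String × String))) (out : Int) : Prop := out = count_open_deliveries_alt data
instance (data : List (List (String × String))) (out : Int) : Decidable (Spec_count_open_deliveries data out) := by unfold Spec_count_open_deliveries; infer_instance

-- ===== CLAIM (what is proved, stated in full; the proofs are below) =====
def Claim_equal_count_open_deliveries : Prop := ∀ (data : List (List (String × String))), Dom_count_open_deliveries data → Pre_count_open_deliveries data → Spec_count_open_deliveries data (count_open_deliveries data)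

-- ===== LEMMAS AND PROOFS =====

-- A's fold adds the per-type counts of the traversed records to the incoming state
theorem pv_fold_counts (data : List (List (String × String))) (s : Int × Int) :
    data.foldl (fun (st : Int × Int) rec =>
      if pvTypeOf rec = "delivery-started" then (st.1 + 1, st.2)
      else if pvTypeOf rec = "delivery-ended" then (st.1, st.2 + 1)
      else st) s
    = (s.1 + ((data.map pvTypeOf).count "delivery-started" : Int),
       s.2 + ((data.map pvTypeOf).count "delivery-ended" : Int)) := by
  induction data generalizing s with
  | nil => simp
  | cons rec rest ih =>
    simp only [List.foldl_cons, List.map_cons, ih]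
    by_cases h1 : pvTypeOf rec = "delivery-started"
    · simp [h1]; ring
    · by_cases h2 : pvTypeOf rec = "delivery-ended"
      · simp [h2]; ring
      · simp [h1, h2]

theorem pv_pre_validates (data : List (List (String × String)))
    (hpre : Pre_count_open_deliveries data) :
    PySem.Set.diff (PySem.Set.ofList (data.map pvTypeOf)) ["delivery-started", "delivery-ended"] = [] := by
  rw [List.eq_nil_iff_forall_not_mem]
  intro t ht
  rw [PySem.Set.mem_diff, PySem.Set.mem_ofList] at ht
  obtain ⟨hmem, hnot⟩ := ht
  obtain ⟨rec, hrec, heq⟩ := List.mem_map.mp hmem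
  rcases hpre rec hrec with h | h <;> simp [← heq, pvTypeOf, h] at hnot

-- ===== VERDICT (by name: the statement is the Claim_ definition above) =====
theorem count_open_deliveries_spec : Claim_equal_count_open_deliveries := by
  intro data _ hpre
  unfold Spec_count_open_deliveries count_open_deliveries count_open_deliveries_alt
  rw [pv_fold_counts, if_neg (by simp [pv_pre_validates data hpre])]
  simp
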